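-- pv_equiv track=rewrite | github.com/Jliporace/reading-kiln-termostat | src/curve_creator.py | count_consecutive_last_element
-- ===== SOURCE A (Python) =====
-- def count_consecutive_last_element(lst):
--     if not lst:  # Check if the list is empty
--         return 1
--
--     last_element = lst[-1]  # Get the last element
--     count = 0
--
--     # Iterate from the end of the list backward
--     for element in reversed(lst):
--         if element == last_element:
--             count += 1
--         else:
--             break  # Stop counting when a different element is encountered
--
--     return count
-- ===== SOURCE B (Python) =====
-- def count_consecutive_last_element(lst):
--     if not lst:
--         return 1
--     last_element = lst[-1]
--     count = 0
--     for element in lst: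
--         if element == last_element:
--             count += 1
--         else:
--             count = 0
--     return count
-- ===== Notes on version B (the rewrite author's own statement) =====
-- stated objective: alternative
-- what changed: Scans the list front-to-back with a counter that resets to 0 on each mismatch, instead of scanning backward over reversed(lst) and breaking at the first mismatch.
import Mathlib
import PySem

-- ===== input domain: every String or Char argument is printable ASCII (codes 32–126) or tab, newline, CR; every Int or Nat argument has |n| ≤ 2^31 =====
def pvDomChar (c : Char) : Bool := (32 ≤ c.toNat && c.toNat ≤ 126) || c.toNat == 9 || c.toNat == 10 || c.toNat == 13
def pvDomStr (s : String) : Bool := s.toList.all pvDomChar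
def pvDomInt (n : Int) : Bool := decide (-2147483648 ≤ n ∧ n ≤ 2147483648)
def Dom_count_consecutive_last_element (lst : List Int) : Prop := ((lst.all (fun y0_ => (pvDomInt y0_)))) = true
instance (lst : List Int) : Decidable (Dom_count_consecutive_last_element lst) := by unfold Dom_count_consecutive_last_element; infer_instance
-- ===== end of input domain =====

-- ===== PORT A =====
-- A: backward scan (over reversed lst) counting until the first mismatch (break).
def pvLoopA (last : Int) : List Int → Int → Int
  | [], count => count
  | x :: xs, count => if x = last then pvLoopA last xs (count + 1) else count

def count_consecutive_last_element (lst : List Int) : Int :=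
  match lst.getLast? with
  | none => 1
  | some last => pvLoopA last lst.reverse 0

-- ===== PORT B =====
-- B: forward scan with a counter that resets to 0 on every mismatch.
def count_consecutive_last_element_alt (lst : List Int) : Int :=
  match lst.getLast? with
  | none => 1
  | some last => lst.foldl (fun count x => if x = last then count + 1 else 0) 0

-- ===== PRECONDITION & SPEC =====
def Spec_count_consecutive_last_element (lst : List Int) (out : Int) : Prop := out = count_consecutive_last_element_alt lst
instance (lst : List Int) (out : Int) : Decidable (Spec_count_consecutive_last_element lst out) := by unfold Spec_count_consecutive_last_element; infer_instance

-- ===== CLAIM (what is proved, stated in full; the proofs are below) =====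
def Claim_equal_count_consecutive_last_element : Prop := ∀ (lst : List Int), Dom_count_consecutive_last_element lst → Spec_count_consecutive_last_element lst (count_consecutive_last_element lst)

-- ===== LEMMAS AND PROOFS =====

-- ===== VERDICT (by name: the statement is the Claim_ definition above) =====
-- accumulator shift for A's loop
theorem pvLoopA_shift (last : Int) (ys : List Int) (c : Int) :
    pvLoopA last ys c = c + pvLoopA last ys 0 := by
  induction ys generalizing c with
  | nil => simp [pvLoopA]
  | cons y ys ih =>
    by_cases h : y = last
    · simp only [pvLoopA, if_pos h]
      rw [ih (c + 1), ih (0 + 1)]; ring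
    · simp [pvLoopA, h]

-- B's forward fold equals A's backward loop, by induction from the right.
theorem pvFold_eq_loopA (last : Int) (xs : List Int) :
    xs.foldl (fun count x => if x = last then count + 1 else 0) 0 = pvLoopA last xs.reverse 0 := by
  induction xs using List.reverseRecOn with
  | nil => simp [pvLoopA]
  | append_singleton xs x ih =>
    rw [List.foldl_append]
    by_cases h : x = last
    · simp only [List.foldl, List.reverse_append, List.reverse_singleton,
        List.singleton_append, pvLoopA, if_pos h]
      rw [pvLoopA_shift last xs.reverse (0 + 1), ih]; ring
    · simp [pvLoopA, h]


theorem count_consecutive_last_element_spec : Claim_equal_count_consecutive_last_element := by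
  intro lst _
  unfold Spec_count_consecutive_last_element count_consecutive_last_element count_consecutive_last_element_alt
  cases h : lst.getLast? with
  | none => rfl
  | some last => exact (pvFold_eq_loopA last lst).symm
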